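-- pv_equiv track=rewrite | github.com/DhanushSds/BIS-LAB-086 | GREYWOLFOPTIMIZER.py | display_grid_with_path
-- ===== SOURCE A (Python) =====
-- def display_grid_with_path(grid, path):
--     """Display the grid with the path overlaid."""
--     path_set = set(path)
--     visual_grid = []
--     for i in range(len(grid)):
--         row = []
--         for j in range(len(grid[0])):
--             if (i, j) in path_set:
--                 row.append('*')  # Mark the path
--             elif grid[i][j] == -1:
--                 row.append('X')  # Represent obstacles
--             else:
--                 row.append('.')  # Represent free spaces
--         visual_grid.append(row)
--     return visual_grid
-- ===== SOURCE B (Python) =====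
-- def display_grid_with_path(grid, path):
--     """Display the grid with the path overlaid."""
--     rows = len(grid)
--     if rows == 0:
--         return []
--     cols = len(grid[0])
--     visual_grid = [['X' if row[j] == -1 else '.' for j in range(cols)] for row in grid]
--     for i, j in path:
--         if 0 <= i < rows and 0 <= j < cols:
--             visual_grid[i][j] = '*'
--     return visual_grid
-- ===== Notes on version B (the rewrite author's own statement) =====
-- stated objective: alternative
-- what changed: B builds the obstacle/free base grid once and then overlays '*' in a single pass over path (guarded in-place writes), instead of A's per-cell membership test against set(path).
-- outside the precondition, e.g. on display_grid_with_path([[0], []], [(1, 0)]): A returns [['.'], ['*']], B raises IndexError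
import Mathlib
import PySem

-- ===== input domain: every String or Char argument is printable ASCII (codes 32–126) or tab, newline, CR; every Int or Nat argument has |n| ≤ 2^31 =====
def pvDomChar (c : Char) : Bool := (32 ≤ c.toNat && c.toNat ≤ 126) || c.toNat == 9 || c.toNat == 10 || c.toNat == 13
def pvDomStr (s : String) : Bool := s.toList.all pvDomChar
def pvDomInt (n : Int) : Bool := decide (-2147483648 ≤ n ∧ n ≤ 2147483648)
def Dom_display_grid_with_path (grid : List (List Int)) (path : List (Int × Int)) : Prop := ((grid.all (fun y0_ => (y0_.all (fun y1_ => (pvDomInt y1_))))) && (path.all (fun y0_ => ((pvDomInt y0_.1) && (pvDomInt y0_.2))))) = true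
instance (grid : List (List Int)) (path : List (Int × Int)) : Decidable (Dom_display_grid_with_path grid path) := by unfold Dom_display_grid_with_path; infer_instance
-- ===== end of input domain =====

-- B builds the obstacle/free base grid once and then overlays '*' in one guarded pass over path,
-- instead of A's per-cell membership test; same asymptotic cost, different decomposition.

-- ===== PORT A =====
def display_grid_with_path (grid : List (List Int)) (path : List (Int × Int)) : List (List String) :=
  let pathSet : PySem.Set (Int × Int) := PySem.Set.ofList path
  (PySem.List.pyRange 0 grid.length 1).foldl (fun visual i =>
    visual ++ [(PySem.List.pyRange 0 (PySem.List.pyGetD grid 0 []).length 1).foldl (fun row j =>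
      row ++ [if PySem.Set.contains pathSet (i, j) then "*"
              else if PySem.List.pyGetD (PySem.List.pyGetD grid i []) j 0 = -1 then "X"
              else "."]) []]) []

-- ===== PORT B =====
def display_grid_with_path_alt (grid : List (List Int)) (path : List (Int × Int)) : List (List String) :=
  if grid.length = 0 then []
  else
    let cols : Nat := (PySem.List.pyGetD grid 0 []).length
    let base : List (List String) :=
      grid.map (fun row =>
        (PySem.List.pyRange 0 cols 1).map (fun j =>
          if PySem.List.pyGetD row j 0 = -1 then "X" else "."))
    path.foldl (fun vg p =>
      if 0 ≤ p.1 ∧ p.1 < (grid.length : Int) ∧ 0 ≤ p.2 ∧ p.2 < (cols : Int) then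
        PySem.List.pySetD vg p.1 (PySem.List.pySetD (PySem.List.pyGetD vg p.1 []) p.2 "*")
      else vg) base

-- ===== PRECONDITION & SPEC =====
-- Pre_ excludes ragged grids with a row shorter than the first row: there A's grid[i][j]
-- (j running up to len(grid[0])) raises IndexError on any short-row cell not covered by path,
-- and B raises on every such grid while building the base.
def Pre_display_grid_with_path (grid : List (List Int)) (path : List (Int × Int)) : Prop :=
  ∀ r ∈ grid, (grid.headD []).length ≤ r.length
instance (grid : List (List Int)) (path : List (Int × Int)) : Decidable (Pre_display_grid_with_path grid path) := by unfold Pre_display_grid_with_path; infer_instance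
def pvWitness_display_grid_with_path : List (List Int) × (List (Int × Int)) := ([[0, -1], [-1, 0]], [(0, 0), (1, 1), (5, 0), (-1, 0)])

def Spec_display_grid_with_path (grid : List (List Int)) (path : List (Int × Int)) (out : List (List String)) : Prop := out = display_grid_with_path_alt grid path
instance (grid : List (List Int)) (path : List (Int × Int)) (out : List (List String)) : Decidable (Spec_display_grid_with_path grid path out) := by unfold Spec_display_grid_with_path; infer_instance

-- ===== CLAIM (what is proved, stated in full; the proofs are below) =====
def Claim_equal_display_grid_with_path : Prop := ∀ (grid : List (List Int)) (path : List (Int × Int)), Dom_display_grid_with_path grid path → Pre_display_grid_with_path grid path → Spec_display_grid_with_path grid path (display_grid_with_path grid path)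

-- ===== LEMMAS AND PROOFS =====

-- cell access through getElem?
def pvCell? (vg : List (List String)) (i j : Nat) : Option String := vg[i]?.bind (fun r => r[j]?)

-- B's overlay step, named for the induction
def pvStep (rows cols : Nat) (vg : List (List String)) (p : Int × Int) : List (List String) :=
  if 0 ≤ p.1 ∧ p.1 < (rows : Int) ∧ 0 ≤ p.2 ∧ p.2 < (cols : Int) then
    PySem.List.pySetD vg p.1 (PySem.List.pySetD (PySem.List.pyGetD vg p.1 []) p.2 "*")
  else vg

lemma pv_ext2 (xs ys : List (List String)) (h0 : xs.length = ys.length)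
    (h : ∀ i j : Nat, pvCell? xs i j = pvCell? ys i j) : xs = ys := by
  apply List.ext_getElem?
  intro i
  by_cases hi : i < xs.length
  · have hi' : i < ys.length := h0 ▸ hi
    rw [List.getElem?_eq_getElem hi, List.getElem?_eq_getElem hi']
    congr 1
    apply List.ext_getElem?
    intro j
    have hij := h i j
    simpa [pvCell?, List.getElem?_eq_getElem hi, List.getElem?_eq_getElem hi'] using hij
  · rw [List.getElem?_eq_none (by omega), List.getElem?_eq_none (by omega)]

lemma pvStep_shape (rows cols : Nat) (vg : List (List String)) (p : Int × Int)
    (hlen : vg.length = rows) :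
    (pvStep rows cols vg p).map List.length = vg.map List.length := by
  unfold pvStep
  split_ifs with hg
  · obtain ⟨h1, h2, h3, h4⟩ := hg
    have hir : p.1.toNat < vg.length := by omega
    rw [PySem.List.pySetD_of_nonneg _ _ h1, List.map_set,
        PySem.List.pySetD_of_nonneg _ _ h3,
        PySem.List.pyGetD_eq_getElem _ _ h1 (by omega), List.length_set]
    have : List.length vg[p.1.toNat] = (vg.map List.length)[p.1.toNat]'(by simpa using hir) := by
      simp
    rw [this, List.set_getElem_self]
  · rfl

lemma pvFoldl_shape (rows cols : Nat) (path : List (Int × Int)) :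
    ∀ vg : List (List String), vg.length = rows →
      (path.foldl (pvStep rows cols) vg).map List.length = vg.map List.length := by
  induction path with
  | nil => intro vg _; rfl
  | cons p t ih =>
    intro vg hlen
    have hs := pvStep_shape rows cols vg p hlen
    have hlen' : (pvStep rows cols vg p).length = rows := by
      have := congrArg List.length hs
      simpa [hlen] using this
    calc (List.foldl (pvStep rows cols) vg (p :: t)).map List.length
        = (t.foldl (pvStep rows cols) (pvStep rows cols vg p)).map List.length := rfl
      _ = (pvStep rows cols vg p).map List.length := ih _ hlen'
      _ = vg.map List.length := hs

lemma pvStep_rows (rows cols : Nat) (vg : List (List String)) (p : Int × Int)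
    (hlen : vg.length = rows) (hrow : ∀ r ∈ vg, r.length = cols) :
    ∀ r ∈ pvStep rows cols vg p, r.length = cols := by
  unfold pvStep
  split_ifs with hg
  · obtain ⟨h1, h2, h3, h4⟩ := hg
    intro r hr
    rw [PySem.List.pySetD_of_nonneg _ _ h1] at hr
    rcases List.mem_or_eq_of_mem_set hr with hr' | hr'
    · exact hrow r hr'
    · subst hr'
      have hir : p.1.toNat < vg.length := by omega
      rw [PySem.List.pySetD_of_nonneg _ _ h3, List.length_set,
          PySem.List.pyGetD_eq_getElem _ _ h1 (by omega)]
      exact hrow _ (List.getElem_mem hir)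
  · exact hrow

lemma pvStep_cell (rows cols : Nat) (vg : List (List String)) (p : Int × Int) (i j : Nat)
    (hlen : vg.length = rows) (hrow : ∀ r ∈ vg, r.length = cols)
    (hi : i < rows) (hj : j < cols) :
    pvCell? (pvStep rows cols vg p) i j =
      if p = ((i : Int), (j : Int)) then some "*" else pvCell? vg i j := by
  have hivg : i < vg.length := by omega
  have hjrow : j < (vg[i]).length := by rw [hrow _ (List.getElem_mem hivg)]; exact hj
  by_cases hp : p = ((i : Int), (j : Int))
  · subst hp
    rw [if_pos rfl]
    simp only [pvStep, pvCell?]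
    rw [if_pos ⟨Int.natCast_nonneg i, by exact_mod_cast hi, Int.natCast_nonneg j, by exact_mod_cast hj⟩]
    rw [PySem.List.pySetD_of_nonneg _ _ (Int.natCast_nonneg i),
        PySem.List.pySetD_of_nonneg _ _ (Int.natCast_nonneg j),
        PySem.List.pyGetD_eq_getElem _ _ (Int.natCast_nonneg i) (by omega)]
    simp [hivg, hjrow]
  · rw [if_neg hp]
    simp only [pvStep, pvCell?]
    split_ifs with hg
    · obtain ⟨h1, h2, h3, h4⟩ := hg
      rw [PySem.List.pySetD_of_nonneg _ _ h1, PySem.List.pySetD_of_nonneg _ _ h3,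
          PySem.List.pyGetD_eq_getElem _ _ h1 (by omega)]
      by_cases hpi : p.1.toNat = i
      · have hpj : p.2.toNat ≠ j := by
          intro hjeq
          apply hp
          have e1 : p.1 = (i : Int) := by omega
          have e2 : p.2 = (j : Int) := by omega
          exact Prod.ext e1 e2
        subst hpi
        simp [hivg, hpj]
      · simp [hpi]
    · rfl

lemma pvFoldl_cell (rows cols : Nat) (path : List (Int × Int)) :
    ∀ vg : List (List String), vg.length = rows → (∀ r ∈ vg, r.length = cols) →
      ∀ i j : Nat, i < rows → j < cols →
        pvCell? (path.foldl (pvStep rows cols) vg) i j =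
          if ((i : Int), (j : Int)) ∈ path then some "*" else pvCell? vg i j := by
  induction path with
  | nil => intro vg _ _ i j _ _; simp
  | cons p t ih =>
    intro vg hlen hrow i j hi hj
    have hlen' : (pvStep rows cols vg p).length = rows := by
      have := congrArg List.length (pvStep_shape rows cols vg p hlen)
      simpa [hlen] using this
    have hrow' := pvStep_rows rows cols vg p hlen hrow
    have hcell := pvStep_cell rows cols vg p i j hlen hrow hi hj
    calc pvCell? (List.foldl (pvStep rows cols) vg (p :: t)) i j
        = pvCell? (t.foldl (pvStep rows cols) (pvStep rows cols vg p)) i j := rfl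
      _ = if ((i : Int), (j : Int)) ∈ t then some "*" else pvCell? (pvStep rows cols vg p) i j :=
          ih _ hlen' hrow' i j hi hj
      _ = if ((i : Int), (j : Int)) ∈ p :: t then some "*" else pvCell? vg i j := by
          rw [hcell]
          by_cases hp : p = ((i : Int), (j : Int)) <;>
            by_cases ht : ((i : Int), (j : Int)) ∈ t <;>
            simp [hp, ht, List.mem_cons, eq_comm]

lemma pvFoldl_rows (rows cols : Nat) (path : List (Int × Int)) :
    ∀ vg : List (List String), vg.length = rows → (∀ r ∈ vg, r.length = cols) →
      ∀ r ∈ path.foldl (pvStep rows cols) vg, r.length = cols := by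
  induction path with
  | nil => intro vg _ hrow; exact hrow
  | cons p t ih =>
    intro vg hlen hrow
    have hlen' : (pvStep rows cols vg p).length = rows := by
      have := congrArg List.length (pvStep_shape rows cols vg p hlen)
      simpa [hlen] using this
    exact ih _ hlen' (pvStep_rows rows cols vg p hlen hrow)

lemma pvCell?_none_right (xs : List (List String)) (i j cols : Nat)
    (hrow : ∀ r ∈ xs, r.length = cols) (hj : ¬ j < cols) : pvCell? xs i j = none := by
  unfold pvCell?
  cases hxi : xs[i]? with
  | none => rfl
  | some r =>
    have hr : r ∈ xs := List.mem_of_getElem? hxi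
    have : r.length ≤ j := by rw [hrow r hr]; omega
    simp [this]

lemma pvCell?_none_left (xs : List (List String)) (i j : Nat) (hi : ¬ i < xs.length) :
    pvCell? xs i j = none := by
  unfold pvCell?
  rw [List.getElem?_eq_none (by omega)]
  rfl

-- A as a nested map over index ranges
lemma pvA_map (grid : List (List Int)) (path : List (Int × Int)) :
    display_grid_with_path grid path =
      (PySem.List.pyRange 0 grid.length 1).map (fun i =>
        (PySem.List.pyRange 0 (PySem.List.pyGetD grid 0 []).length 1).map (fun j =>
          if (i, j) ∈ path then "*"
          else if PySem.List.pyGetD (PySem.List.pyGetD grid i []) j 0 = -1 then "X"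
          else ".")) := by
  unfold display_grid_with_path
  rw [PySem.List.foldl_append_singleton_eq_map, List.nil_append]
  refine List.map_congr_left ?_
  intro i _
  rw [PySem.List.foldl_append_singleton_eq_map, List.nil_append]
  refine List.map_congr_left ?_
  intro j _
  simp [PySem.Set.mem_ofList]

-- ===== VERDICT (by name: the statement is the Claim_ definition above) =====
theorem display_grid_with_path_spec : Claim_equal_display_grid_with_path := by
  intro grid path _ _
  unfold Spec_display_grid_with_path display_grid_with_path_alt
  by_cases h0 : grid.length = 0
  · rw [if_pos h0, pvA_map, h0]
    simp [PySem.List.pyRange_one_eq_nil]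
  · rw [if_neg h0]
    set cols : Nat := (PySem.List.pyGetD grid 0 []).length with hcols
    set base : List (List String) :=
      grid.map (fun row =>
        (PySem.List.pyRange 0 cols 1).map (fun j =>
          if PySem.List.pyGetD row j 0 = -1 then "X" else ".")) with hbase
    have hbl : base.length = grid.length := by simp [hbase]
    have hbrow : ∀ r ∈ base, r.length = cols := by
      intro r hr
      rw [hbase] at hr
      obtain ⟨row, _, rfl⟩ := List.mem_map.mp hr
      simp
    have hstep : (path.foldl (fun vg p =>
        if 0 ≤ p.1 ∧ p.1 < (grid.length : Int) ∧ 0 ≤ p.2 ∧ p.2 < (cols : Int) then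
          PySem.List.pySetD vg p.1 (PySem.List.pySetD (PySem.List.pyGetD vg p.1 []) p.2 "*")
        else vg) base) = path.foldl (pvStep grid.length cols) base := rfl
    rw [hstep, pvA_map]
    set F := path.foldl (pvStep grid.length cols) base with hF
    have hFshape := pvFoldl_shape grid.length cols path base hbl
    have hFl : F.length = grid.length := by
      have := congrArg List.length hFshape
      simpa [hbl] using this
    have hFrow : ∀ r ∈ F, r.length = cols := pvFoldl_rows grid.length cols path base hbl hbrow
    apply pv_ext2
    · simp [List.length_map, PySem.List.length_pyRange_one, hFl]
    · intro i j
      by_cases hi : i < grid.length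
      · have hAi := PySem.List.getElem?_map_pyRange_zero
          (fun i => (PySem.List.pyRange 0 (cols : Int) 1).map (fun j =>
            if (i, j) ∈ path then "*"
            else if PySem.List.pyGetD (PySem.List.pyGetD grid i []) j 0 = -1 then "X"
            else ".")) grid.length i hi
        by_cases hj : j < cols
        · have hgi : PySem.List.pyGetD grid ((i : Nat) : Int) [] = grid[i] := by
            rw [PySem.List.pyGetD_eq_getElem _ _ (Int.natCast_nonneg i) (by exact_mod_cast hi)]
            simp
          have hAcell : pvCell? ((PySem.List.pyRange 0 (grid.length : Int) 1).map (fun i =>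
              (PySem.List.pyRange 0 (cols : Int) 1).map (fun j =>
                if (i, j) ∈ path then "*"
                else if PySem.List.pyGetD (PySem.List.pyGetD grid i []) j 0 = -1 then "X"
                else "."))) i j =
              some (if (((i : Nat) : Int), ((j : Nat) : Int)) ∈ path then "*"
                else if PySem.List.pyGetD grid[i] ((j : Nat) : Int) 0 = -1 then "X" else ".") := by
            rw [pvCell?, hAi, Option.bind_some, PySem.List.getElem?_map_pyRange_zero _ _ _ hj, hgi]
          have hbcell : pvCell? base i j =
              some (if PySem.List.pyGetD grid[i] ((j : Nat) : Int) 0 = -1 then "X" else ".") := by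
            have hbi : base[i]? = some ((PySem.List.pyRange 0 (cols : Int) 1).map (fun j =>
                if PySem.List.pyGetD grid[i] j 0 = -1 then "X" else ".")) := by
              rw [hbase, List.getElem?_map, List.getElem?_eq_getElem hi]
              rfl
            rw [pvCell?, hbi, Option.bind_some, PySem.List.getElem?_map_pyRange_zero _ _ _ hj]
          rw [hAcell, hF, pvFoldl_cell grid.length cols path base hbl hbrow i j hi hj, hbcell]
          by_cases hmem : (((i : Nat) : Int), ((j : Nat) : Int)) ∈ path <;> simp [hmem]
        · rw [pvCell?_none_right F i j cols hFrow hj]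
          rw [pvCell?, hAi, Option.bind_some, List.getElem?_eq_none (by simp [PySem.List.length_pyRange_one]; omega)]
      · rw [pvCell?_none_left F i j (by omega)]
        rw [pvCell?_none_left _ i j (by simp [List.length_map, PySem.List.length_pyRange_one]; omega)]
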